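-- pv_equiv track=rewrite | github.com/tnv1154/Python-Ptit | PY01041_So tang giam.py | check
-- ===== SOURCE A (Python) =====
-- def find_idx(s):
--     for i in range(0, len(s) - 1):
--         if s[i] >= s[i+1]:
--             return i
--     return len(s) - 1
--
-- def check(s):
--     if len(s) < 3:
--         return False
--     idx = find_idx(s)
--     if idx != len(s) - 1:
--         for i in range(idx, len(s) - 1):
--             if s[i] <= s[i+1]:
--                 return False
--     else :
--         return False
--     return True
-- ===== SOURCE B (Python) =====
-- def check(s):
--     n = len(s)
--     if n < 3:
--         return False
--     p = s.index(max(s))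
--     for i in range(p):
--         if s[i] >= s[i + 1]:
--             return False
--     for i in range(p, n - 1):
--         if s[i] <= s[i + 1]:
--             return False
--     return p != n - 1
-- ===== Notes on version B (the rewrite author's own statement) =====
-- stated objective: alternative
-- what changed: B locates the peak directly as the index of the (unique) maximum via max()/index() and then verifies the strictly-increasing prefix and strictly-decreasing suffix around it, instead of A's find-first-descent scan followed by a descent check.
import Mathlib
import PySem

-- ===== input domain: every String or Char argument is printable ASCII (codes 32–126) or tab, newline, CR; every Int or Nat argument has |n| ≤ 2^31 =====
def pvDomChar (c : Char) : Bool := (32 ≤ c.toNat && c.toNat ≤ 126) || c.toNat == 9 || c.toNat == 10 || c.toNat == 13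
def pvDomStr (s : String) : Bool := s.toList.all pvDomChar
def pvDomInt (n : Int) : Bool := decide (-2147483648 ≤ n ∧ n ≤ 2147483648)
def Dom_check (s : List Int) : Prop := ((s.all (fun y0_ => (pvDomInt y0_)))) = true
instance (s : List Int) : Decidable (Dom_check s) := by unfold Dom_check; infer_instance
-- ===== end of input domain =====

-- B finds the peak as the index of the unique maximum (s.index(max(s))) and checks both slopes
-- around it, instead of A's scan for the first descent; alternative decomposition, same O(n) cost.

-- ===== PORT A =====
-- find_idx: scan i = 0 .. len-2 for the first i with s[i] >= s[i+1]; all indices are in range,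
-- so getD is exact here.
def faGo (s : List Int) : List Nat → Int
  | [] => (s.length : Int) - 1
  | i :: rest => if s.getD (i+1) 0 ≤ s.getD i 0 then (i : Int) else faGo s rest

def find_idx (s : List Int) : Int := faGo s (List.range' 0 (s.length - 1))

-- the for-loop of check: return False if s[i] <= s[i+1] for some i in range(idx, len-1)
def aDec (s : List Int) : List Nat → Bool
  | [] => true
  | i :: rest => if s.getD i 0 ≤ s.getD (i+1) 0 then false else aDec s rest

def check (s : List Int) : Bool :=
  if s.length < 3 then false
  else if find_idx s ≠ (s.length : Int) - 1 then
    -- in this branch find_idx returned a found loop index, hence ≥ 0, so .toNat is exact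
    aDec s (List.range' (find_idx s).toNat (s.length - 1 - (find_idx s).toNat))
  else false

-- ===== PORT B =====
-- first loop of Source B: return False if s[i] >= s[i+1] for some i in range(p)
def bInc (s : List Int) : List Nat → Bool
  | [] => true
  | i :: rest => if s.getD i 0 ≥ s.getD (i+1) 0 then false else bInc s rest

-- second loop of Source B: return False if s[i] <= s[i+1] for some i in range(p, n-1)
def bDec (s : List Int) : List Nat → Bool
  | [] => true
  | i :: rest => if s.getD i 0 ≤ s.getD (i+1) 0 then false else bDec s rest

-- body of Source B after p = s.index(max(s)): the two loops, then 'return p != n - 1'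
def bBody (s : List Int) (p : Nat) : Bool :=
  if bInc s (List.range' 0 p) = false then false
  else if bDec s (List.range' p (s.length - 1 - p)) = false then false
  else decide (p ≠ s.length - 1)

def check_alt (s : List Int) : Bool :=
  if s.length < 3 then false
  else
    -- s is nonempty here, so max() returns a value and index() finds it: both getD are exact
    bBody s ((PySem.List.index? s ((PySem.List.max? s (fun y => y)).getD 0)).getD 0)

-- ===== PRECONDITION & SPEC =====
def Spec_check (s : List Int) (out : Bool) : Prop := out = check_alt s
instance (s : List Int) (out : Bool) : Decidable (Spec_check s out) := by unfold Spec_check; infer_instance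

-- ===== CLAIM (what is proved, stated in full; the proofs are below) =====
def Claim_equal_check : Prop := ∀ (s : List Int), Dom_check s → Spec_check s (check s)

-- ===== LEMMAS AND PROOFS =====

-- abbreviation used throughout the proofs
def g (s : List Int) (i : Nat) : Int := s.getD i 0

-- "s is a mountain": strictly increasing before p, strictly decreasing from p on
abbrev Peak (s : List Int) (p : Nat) : Prop :=
  (∀ i, i < p → g s i < g s (i+1)) ∧ (∀ i, p ≤ i → i + 1 < s.length → g s (i+1) < g s i)

abbrev Uni (s : List Int) : Prop :=
  3 ≤ s.length ∧ ∃ p, p < s.length - 1 ∧ Peak s p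

theorem bInc_true_iff (s : List Int) : ∀ (k a : Nat),
    (bInc s (List.range' a k) = true ↔ ∀ i, a ≤ i → i < a + k → g s i < g s (i+1)) := by
  intro k
  induction k with
  | zero => intro a; simp [bInc]; omega
  | succ k ih =>
    intro a
    rw [List.range'_succ]
    simp only [bInc]
    split_ifs with h
    · constructor
      · intro h'; exact h'.elim
      · intro h'
        exact absurd (h' a le_rfl (by omega)) (by simp only [g]; omega)
    · rw [ih (a+1)]
      constructor
      · intro h' i hai hik
        rcases Nat.eq_or_lt_of_le hai with rfl | hlt
        · simp only [g]; omega
        · exact h' i hlt (by omega)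
      · intro h' i hai hik; exact h' i (by omega) (by omega)

theorem bDec_true_iff (s : List Int) : ∀ (k a : Nat),
    (bDec s (List.range' a k) = true ↔ ∀ i, a ≤ i → i < a + k → g s (i+1) < g s i) := by
  intro k
  induction k with
  | zero => intro a; simp [bDec]; omega
  | succ k ih =>
    intro a
    rw [List.range'_succ]
    simp only [bDec]
    split_ifs with h
    · constructor
      · intro h'; exact h'.elim
      · intro h'
        exact absurd (h' a le_rfl (by omega)) (by simp only [g]; omega)
    · rw [ih (a+1)]
      constructor
      · intro h' i hai hik
        rcases Nat.eq_or_lt_of_le hai with rfl | hlt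
        · simp only [g]; omega
        · exact h' i hlt (by omega)
      · intro h' i hai hik; exact h' i (by omega) (by omega)

theorem aDec_eq_bDec (s : List Int) : ∀ l, aDec s l = bDec s l := by
  intro l; induction l with
  | nil => rfl
  | cons i rest ih => simp only [aDec, bDec]; split_ifs <;> [rfl; exact ih]

theorem faGo_none (s : List Int) : ∀ (k a : Nat),
    (∀ i, a ≤ i → i < a + k → g s i < g s (i+1)) →
    faGo s (List.range' a k) = (s.length : Int) - 1 := by
  intro k
  induction k with
  | zero => intro a _; rfl
  | succ k ih =>
    intro a h
    rw [List.range'_succ]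
    simp only [faGo]
    rw [if_neg (by have := h a le_rfl (by omega); simp only [g] at this; omega)]
    exact ih (a+1) (fun i h1 h2 => h i (by omega) (by omega))

theorem faGo_found (s : List Int) : ∀ (k a j : Nat), a ≤ j → j < a + k →
    ¬ g s j < g s (j+1) → (∀ i, a ≤ i → i < j → g s i < g s (i+1)) →
    faGo s (List.range' a k) = (j : Int) := by
  intro k
  induction k with
  | zero => intro a j h1 h2; omega
  | succ k ih =>
    intro a j h1 h2 hj hpre
    rw [List.range'_succ]
    simp only [faGo]
    rcases Nat.eq_or_lt_of_le h1 with rfl | hlt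
    · rw [if_pos (by simp only [g] at hj; omega)]
    · rw [if_neg (by have := hpre a le_rfl hlt; simp only [g] at this; omega)]
      exact ih (a+1) j hlt (by omega) hj (fun i hi hij => hpre i (by omega) hij)

-- strict monotone chains give a strict maximum at the peak
theorem chain_inc (s : List Int) (p : Nat) (h : ∀ i, i < p → g s i < g s (i+1)) :
    ∀ i, i < p → g s i < g s p := by
  intro i hi
  have key : ∀ d, i + d ≤ p → 0 < d → g s i < g s (i + d) := by
    intro d
    induction d with
    | zero => omega
    | succ d ihd =>
      intro hle _
      rcases Nat.eq_zero_or_pos d with rfl | hd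
      · simpa using h i (by omega)
      · have h1 := ihd (by omega) hd
        have h2 := h (i + d) (by omega)
        have he : i + (d + 1) = (i + d) + 1 := by omega
        rw [he]; omega
  have := key (p - i) (by omega) (by omega)
  rwa [show i + (p - i) = p by omega] at this

theorem chain_dec (s : List Int) (p : Nat)
    (h : ∀ i, p ≤ i → i + 1 < s.length → g s (i+1) < g s i) :
    ∀ i, p < i → i < s.length → g s i < g s p := by
  intro i hpi hilen
  have key : ∀ d, p + d ≤ i → 0 < d → g s (p + d) < g s p := by
    intro d
    induction d with
    | zero => omega
    | succ d ihd =>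
      intro hle _
      have hstep := h (p + d) (by omega) (by omega)
      rcases Nat.eq_zero_or_pos d with rfl | hd
      · simpa using hstep
      · have h1 := ihd (by omega) hd
        have he : p + (d + 1) = (p + d) + 1 := by omega
        rw [he]; omega
  have := key (i - p) (by omega) (by omega)
  rwa [show p + (i - p) = i by omega] at this

theorem g_getElem (s : List Int) (i : Nat) (h : i < s.length) : g s i = s[i] := by
  simp [g, List.getD_eq_getElem?_getD, List.getElem?_eq_getElem h]

-- at a strict maximum, Python's max() yields s[p] and index() yields p
theorem max_index_eq (s : List Int) (p : Nat) (hp : p < s.length)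
    (hmax : ∀ i, i < s.length → i ≠ p → g s i < g s p) :
    PySem.List.max? s (fun y => y) = some (g s p) ∧
    PySem.List.index? s (g s p) = some p := by
  have hne : s ≠ [] := by intro he; rw [he] at hp; simp at hp
  obtain ⟨m, hm⟩ : ∃ m, PySem.List.max? s (fun y => y) = some m := by
    cases s with
    | nil => exact absurd hp (by simp)
    | cons x t => exact ⟨t.foldl max x, PySem.List.max?_id_cons x t⟩
  have hmem := PySem.List.max?_mem hm
  have hle : ∀ y ∈ s, y ≤ m := fun y hy => PySem.List.max?_isMax hm y hy
  obtain ⟨i, hi, hiv⟩ := List.mem_iff_getElem.mp hmem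
  have hmp : m = g s p := by
    by_cases hip : i = p
    · rw [← hiv, ← g_getElem s i hi, hip]
    · have h1 := hmax i hi hip
      have h2 := hle s[p] (List.getElem_mem hp)
      rw [← g_getElem s i hi] at hiv
      rw [← g_getElem s p hp] at h2
      omega
  subst hmp
  refine ⟨hm, ?_⟩
  obtain ⟨p', hp'⟩ : ∃ p', PySem.List.index? s (g s p) = some p' :=
    Option.isSome_iff_exists.mp ((PySem.List.index?_isSome_iff s (g s p)).mpr hmem)
  obtain ⟨hk, hv, _⟩ := PySem.List.getElem_of_index?_eq_some hp'
  have hpp : p' = p := by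
    by_contra hne'
    have := hmax p' hk hne'
    rw [← g_getElem s p' hk] at hv
    omega
  rw [hp', hpp]

-- A returns true exactly on mountains
theorem checkA_iff (s : List Int) : check s = true ↔ Uni s := by
  unfold check
  by_cases hlen : s.length < 3
  · rw [if_pos hlen]
    simp only [Bool.false_eq_true, false_iff]
    rintro ⟨h3, -⟩; omega
  · rw [if_neg hlen]
    push_neg at hlen
    by_cases hall : ∀ i, i < s.length - 1 → g s i < g s (i+1)
    · have hfi : find_idx s = (s.length : Int) - 1 :=
        faGo_none s (s.length - 1) 0 (fun i _ h2 => hall i (by omega))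
      rw [hfi, if_neg (by simp)]
      simp only [Bool.false_eq_true, false_iff]
      rintro ⟨h3, p, hplt, hinc, hdec⟩
      have h1 := hdec p le_rfl (by omega)
      have h2 := hall p (by omega)
      omega
    · push_neg at hall
      have hex : ∃ j, j < s.length - 1 ∧ ¬ g s j < g s (j+1) := by
        obtain ⟨i, h1, h2⟩ := hall; exact ⟨i, h1, by omega⟩
      classical
      obtain ⟨hjlt, hjviol⟩ := Nat.find_spec hex
      have hjmin : ∀ i, i < Nat.find hex → i < s.length - 1 → g s i < g s (i+1) := by
        intro i hi hin
        by_contra hcon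
        exact Nat.find_min hex hi ⟨hin, hcon⟩
      have hfi : find_idx s = (Nat.find hex : Int) :=
        faGo_found s (s.length - 1) 0 (Nat.find hex) (Nat.zero_le _) (by omega) hjviol
          (fun i _ hij => hjmin i hij (by omega))
      rw [hfi, if_pos (by omega)]
      simp only [Int.toNat_natCast]
      rw [aDec_eq_bDec, bDec_true_iff]
      constructor
      · intro hdec
        exact ⟨hlen, Nat.find hex, hjlt, fun i hij => hjmin i hij (by omega),
          fun i hji hi1 => hdec i hji (by omega)⟩
      · rintro ⟨h3, p, hplt, hinc, hdec⟩
        have hjp : Nat.find hex = p := by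
          have h1 : Nat.find hex ≤ p :=
            Nat.find_min' hex ⟨by omega, by have := hdec p le_rfl (by omega); omega⟩
          rcases Nat.eq_or_lt_of_le h1 with h | h
          · exact h
          · exact absurd (hinc _ h) hjviol
        intro i h1i h2i
        rw [hjp] at h1i
        exact hdec i h1i (by omega)

-- B returns true exactly on mountains
theorem checkB_iff (s : List Int) : check_alt s = true ↔ Uni s := by
  unfold check_alt
  by_cases hlen : s.length < 3
  · rw [if_pos hlen]
    simp only [Bool.false_eq_true, false_iff]
    rintro ⟨h3, -⟩; omega
  · rw [if_neg hlen]
    push_neg at hlen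
    constructor
    · intro h
      obtain ⟨m, hm⟩ : ∃ m, PySem.List.max? s (fun y => y) = some m := by
        cases s with
        | nil => exact absurd hlen (by simp)
        | cons x t => exact ⟨t.foldl max x, PySem.List.max?_id_cons x t⟩
      have hmem := PySem.List.max?_mem hm
      obtain ⟨p, hp⟩ : ∃ p, PySem.List.index? s m = some p :=
        Option.isSome_iff_exists.mp ((PySem.List.index?_isSome_iff s m).mpr hmem)
      rw [hm] at h; simp only [Option.getD_some] at h
      rw [hp] at h; simp only [Option.getD_some] at h
      obtain ⟨hplen, -, -⟩ := PySem.List.getElem_of_index?_eq_some hp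
      rcases hb1 : bInc s (List.range' 0 p) with _ | _
      · simp [bBody, hb1] at h
      · rcases hb2 : bDec s (List.range' p (s.length - 1 - p)) with _ | _
        · simp [bBody, hb1, hb2] at h
        · have hpne : p ≠ s.length - 1 := by simpa [bBody, hb1, hb2] using h
          have hplt : p < s.length - 1 := by omega
          refine ⟨hlen, p, hplt, ?_, ?_⟩
          · intro i hi
            exact (bInc_true_iff s p 0).mp hb1 i (Nat.zero_le _) (by omega)
          · intro i h1i h2i
            exact (bDec_true_iff s (s.length - 1 - p) p).mp hb2 i h1i (by omega)
    · rintro ⟨h3, p, hplt, hinc, hdec⟩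
      have hpn : p < s.length := by omega
      have hmax : ∀ i, i < s.length → i ≠ p → g s i < g s p := by
        intro i hi hnep
        rcases Nat.lt_or_ge i p with hc | hc
        · exact chain_inc s p hinc i hc
        · exact chain_dec s p hdec i (by omega) hi
      obtain ⟨hm, hidx⟩ := max_index_eq s p hpn hmax
      rw [hm]; simp only [Option.getD_some]
      rw [hidx]; simp only [Option.getD_some]
      unfold bBody
      have hI : bInc s (List.range' 0 p) = true :=
        (bInc_true_iff s p 0).mpr (fun i _ h2 => hinc i (by omega))
      have hD : bDec s (List.range' p (s.length - 1 - p)) = true :=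
        (bDec_true_iff s (s.length - 1 - p) p).mpr (fun i h1 h2 => hdec i h1 (by omega))
      simp only [hI, hD]
      simp only [Bool.true_eq_false, if_false, decide_eq_true_eq]
      omega

-- ===== VERDICT (by name: the statement is the Claim_ definition above) =====
theorem check_spec : Claim_equal_check := by
  intro s _
  unfold Spec_check
  rcases hA : check s with _ | _ <;> rcases hB : check_alt s with _ | _
  · rfl
  · exact absurd ((checkA_iff s).mpr ((checkB_iff s).mp hB)) (by simp [hA])
  · exact absurd ((checkB_iff s).mpr ((checkA_iff s).mp hA)) (by simp [hB])
  · rfl
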